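-- pv_equiv track=rewrite | github.com/seongwon030/algorithm_Term | ALGO/알고리즘/과제1/이진수열.py | count_binary_sequence
-- ===== SOURCE A (Python) =====
-- def count_binary_sequence(n):
--     if n == 1:
--         return 2
--     elif n == 2:
--         return 3
--
--     dp = [0] * (n+1)
--     dp[1] = 2
--     dp[2] = 3
--
--     for i in range(3, n+1):
--         dp[i] = dp[i-1] + dp[i-2]
--
--     return dp[n]
-- ===== SOURCE B (Python) =====
-- def count_binary_sequence(n):
--     # The answer is Fibonacci(n+2) (with F1=F2=1); compute it by fast doubling.
--     def fd(k):
--         # returns (F(k), F(k+1))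
--         if k == 0:
--             return (0, 1)
--         a, b = fd(k >> 1)
--         c = a * (2 * b - a)
--         d = a * a + b * b
--         if k & 1:
--             return (d, c + d)
--         return (c, d)
--     return fd(n + 2)[0]
-- ===== Notes on version B (the rewrite author's own statement) =====
-- stated objective: faster
-- what changed: Replaces the O(n) dp-array Fibonacci-style recurrence with fast-doubling Fibonacci (answer = Fib(n+2)), O(log n) arithmetic steps.
import Mathlib
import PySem

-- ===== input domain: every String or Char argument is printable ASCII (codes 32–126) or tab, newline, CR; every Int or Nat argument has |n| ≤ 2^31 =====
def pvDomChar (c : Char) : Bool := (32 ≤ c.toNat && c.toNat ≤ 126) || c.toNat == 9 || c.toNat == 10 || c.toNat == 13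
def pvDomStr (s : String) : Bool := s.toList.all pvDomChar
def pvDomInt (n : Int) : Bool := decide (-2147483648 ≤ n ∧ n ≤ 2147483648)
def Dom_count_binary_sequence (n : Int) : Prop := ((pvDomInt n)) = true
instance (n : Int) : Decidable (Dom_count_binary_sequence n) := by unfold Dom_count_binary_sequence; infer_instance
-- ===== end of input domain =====

-- B replaces A's O(n) dp-array recurrence by fast-doubling Fibonacci (answer = Fib(n+2)): faster.

-- ===== PORT A =====
def count_binary_sequence (n : Int) : Int :=
  if n = 1 then 2
  else if n = 2 then 3
  else
    -- dp = [0] * (n+1); dp[1] = 2; dp[2] = 3  (index assignments raise outside Pre_)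
    let dp := List.replicate (n + 1).toNat (0 : Int)
    let dp := PySem.List.pySetD dp 1 2
    let dp := PySem.List.pySetD dp 2 3
    let dp := (PySem.List.pyRange 3 (n + 1) 1).foldl
      (fun dp i =>
        PySem.List.pySetD dp i (PySem.List.pyGetD dp (i - 1) 0 + PySem.List.pyGetD dp (i - 2) 0))
      dp
    PySem.List.pyGetD dp n 0

-- ===== PORT B =====
-- fd(k) of Source B: Python recurses on k >> 1; ported over Nat (exact for the k = n+2 ≥ 0
-- reached from any n ≥ -2, in particular on all of Pre_).
def pvFd : Nat → Int × Int
  | 0 => (0, 1)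
  | (k + 1) =>
    let p := pvFd ((k + 1) / 2)
    let a := p.1
    let b := p.2
    let c := a * (2 * b - a)
    let d := a * a + b * b
    if (k + 1) % 2 = 1 then (d, c + d) else (c, d)
decreasing_by exact Nat.div_lt_self (Nat.succ_pos k) (by norm_num)

def count_binary_sequence_alt (n : Int) : Int := (pvFd (n + 2).toNat).1

-- ===== PRECONDITION & SPEC =====
-- Pre_: A raises IndexError ('dp[1] = 2' out of range) for every n ≤ 0.
def Pre_count_binary_sequence (n : Int) : Prop := 1 ≤ n
instance (n : Int) : Decidable (Pre_count_binary_sequence n) := by unfold Pre_count_binary_sequence; infer_instance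
def pvWitness_count_binary_sequence : Int := 5

def Spec_count_binary_sequence (n : Int) (out : Int) : Prop := out = count_binary_sequence_alt n
instance (n : Int) (out : Int) : Decidable (Spec_count_binary_sequence n out) := by unfold Spec_count_binary_sequence; infer_instance

-- ===== CLAIM (what is proved, stated in full; the proofs are below) =====
def Claim_equal_count_binary_sequence : Prop := ∀ (n : Int), Dom_count_binary_sequence n → Pre_count_binary_sequence n → Spec_count_binary_sequence n (count_binary_sequence n)

-- ===== LEMMAS AND PROOFS =====

-- B computes Fibonacci pairs.
theorem pvFd_eq (k : Nat) : pvFd k = ((Nat.fib k : Int), (Nat.fib (k + 1) : Int)) := by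
  induction k using Nat.strong_induction_on with
  | _ k ih =>
    match k with
    | 0 => simp [pvFd]
    | (k + 1) =>
      rw [pvFd, ih ((k + 1) / 2) (Nat.div_lt_self (Nat.succ_pos k) (by norm_num))]
      set m := (k + 1) / 2 with hm
      have hle : Nat.fib m ≤ 2 * Nat.fib (m + 1) :=
        le_trans (Nat.fib_mono (Nat.le_succ m)) (Nat.le_mul_of_pos_left _ (by norm_num))
      have hfib2 : (Nat.fib (2 * m) : Int) = (Nat.fib m : Int) * (2 * (Nat.fib (m + 1) : Int) - (Nat.fib m : Int)) := by
        have h := Nat.fib_two_mul m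
        push_cast [h, Nat.cast_sub hle]
        ring
      have hfib21 : (Nat.fib (2 * m + 1) : Int) = (Nat.fib m : Int) * (Nat.fib m : Int) + (Nat.fib (m + 1) : Int) * (Nat.fib (m + 1) : Int) := by
        have h := Nat.fib_two_mul_add_one m
        push_cast [h]
        ring
      have hfib22 : (Nat.fib (2 * m + 2) : Int) = (Nat.fib (2 * m) : Int) + (Nat.fib (2 * m + 1) : Int) := by
        have h := Nat.fib_add_two (n := 2 * m)
        push_cast [h]
        ring
      by_cases hodd : (k + 1) % 2 = 1
      · have hk : k + 1 = 2 * m + 1 := by omega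
        rw [if_pos hodd]
        refine Prod.ext ?_ ?_
        · show (Nat.fib m : Int) * (Nat.fib m : Int) + (Nat.fib (m + 1) : Int) * (Nat.fib (m + 1) : Int) = (Nat.fib (k + 1) : Int)
          rw [hk, hfib21]
        · show (Nat.fib m : Int) * (2 * (Nat.fib (m + 1) : Int) - (Nat.fib m : Int)) +
              ((Nat.fib m : Int) * (Nat.fib m : Int) + (Nat.fib (m + 1) : Int) * (Nat.fib (m + 1) : Int)) = (Nat.fib (k + 1 + 1) : Int)
          rw [show k + 1 + 1 = 2 * m + 2 by omega, hfib22, hfib2, hfib21]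
      · have hk : k + 1 = 2 * m := by omega
        rw [if_neg hodd]
        refine Prod.ext ?_ ?_
        · show (Nat.fib m : Int) * (2 * (Nat.fib (m + 1) : Int) - (Nat.fib m : Int)) = (Nat.fib (k + 1) : Int)
          rw [hk, hfib2]
        · show (Nat.fib m : Int) * (Nat.fib m : Int) + (Nat.fib (m + 1) : Int) * (Nat.fib (m + 1) : Int) = (Nat.fib (k + 1 + 1) : Int)
          rw [show k + 1 + 1 = 2 * m + 1 by omega, hfib21]

-- the dp-cell value after the loop: 0 at index 0, Fib(j+2) elsewhere
def pvVal (j : Nat) : Int := if j = 0 then 0 else (Nat.fib (j + 2) : Int)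

-- loop invariant for A's dp fold
theorem pvLoop (n : Nat) (hn : 3 ≤ n) (k : Nat) (hk2 : 2 ≤ k) (hkn : k ≤ n) :
    ((PySem.List.pyRange 3 ((k : Int) + 1) 1).foldl
      (fun dp i =>
        PySem.List.pySetD dp i (PySem.List.pyGetD dp (i - 1) 0 + PySem.List.pyGetD dp (i - 2) 0))
      (((List.replicate (n + 1) (0 : Int)).set 1 2).set 2 3)).length = n + 1 ∧
    ∀ j : Nat, j ≤ k →
      ((PySem.List.pyRange 3 ((k : Int) + 1) 1).foldl
        (fun dp i =>
          PySem.List.pySetD dp i (PySem.List.pyGetD dp (i - 1) 0 + PySem.List.pyGetD dp (i - 2) 0))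
        (((List.replicate (n + 1) (0 : Int)).set 1 2).set 2 3))[j]? = some (pvVal j) := by
  induction k with
  | zero => omega
  | succ k ih =>
    by_cases hk : k + 1 = 2
    · -- first iteration not reached yet: range(3, 3) is empty
      have hk1 : k = 1 := by omega
      subst hk1
      have hnil : PySem.List.pyRange 3 (((1 + 1 : Nat) : Int) + 1) 1 = [] :=
        PySem.List.pyRange_one_eq_nil (by norm_num)
      rw [hnil]
      simp only [List.foldl_nil]
      refine ⟨by simp, ?_⟩
      intro j hj
      have h0 : 0 < n + 1 := by omega
      have h1 : 1 < n + 1 := by omega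
      have h2' : 2 < n + 1 := by omega
      interval_cases j <;>
        simp [pvVal, List.getElem?_set, List.getElem?_replicate, h0, h1, h2'] <;> decide
    · have hk2' : 2 ≤ k := by omega
      have hkn' : k ≤ n := by omega
      obtain ⟨hlen, hval⟩ := ih hk2' hkn'
      have hsplit : PySem.List.pyRange 3 (((k + 1 : Nat) : Int) + 1) 1 =
          PySem.List.pyRange 3 ((k : Int) + 1) 1 ++ [((k + 1 : Nat) : Int)] := by
        have h := PySem.List.pyRange_one_succ_right (a := 3) (b := (k : Int) + 1) (by
          have : (2 : Int) ≤ (k : Int) := by exact_mod_cast hk2'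
          omega)
        have e : ((k + 1 : Nat) : Int) + 1 = ((k : Int) + 1) + 1 := by push_cast; ring
        have e2 : ((k + 1 : Nat) : Int) = (k : Int) + 1 := by push_cast; ring
        rw [e, e2, h]
      rw [hsplit, List.foldl_append, List.foldl_cons, List.foldl_nil]
      set dp := (PySem.List.pyRange 3 ((k : Int) + 1) 1).foldl
        (fun dp i =>
          PySem.List.pySetD dp i (PySem.List.pyGetD dp (i - 1) 0 + PySem.List.pyGetD dp (i - 2) 0))
        (((List.replicate (n + 1) (0 : Int)).set 1 2).set 2 3) with hdp
      have hidx1 : (((k + 1 : Nat) : Int) - 1) = ((k : Nat) : Int) := by push_cast; ring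
      have hidx2 : (((k + 1 : Nat) : Int) - 2) = ((k - 1 : Nat) : Int) := by
        push_cast [Nat.cast_sub (by omega : 1 ≤ k)]; ring
      have hget1 : PySem.List.pyGetD dp (((k + 1 : Nat) : Int) - 1) 0 = (Nat.fib (k + 2) : Int) := by
        rw [hidx1, PySem.List.pyGetD_natCast]
        have h := hval k (le_refl k)
        simp only [List.getD, h, Option.getD_some, pvVal]
        rw [if_neg (by omega)]
      have hget2 : PySem.List.pyGetD dp (((k + 1 : Nat) : Int) - 2) 0 = (Nat.fib (k + 1) : Int) := by
        rw [hidx2, PySem.List.pyGetD_natCast]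
        have h := hval (k - 1) (by omega)
        simp only [List.getD, h, Option.getD_some, pvVal]
        rw [if_neg (by omega)]
        rw [show k - 1 + 2 = k + 1 by omega]
      rw [hget1, hget2, PySem.List.pySetD_natCast]
      constructor
      · simpa using hlen
      · intro j hj
        by_cases hjk : j = k + 1
        · subst hjk
          rw [List.getElem?_set_self (by omega)]
          have hf : (Nat.fib (k + 2) : Int) + (Nat.fib (k + 1) : Int) = (Nat.fib (k + 3) : Int) := by
            have h := Nat.fib_add_two (n := k + 1)
            push_cast [h]; ring
          rw [hf]
          simp only [pvVal]
          rw [if_neg (by omega)]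
        · rw [List.getElem?_set_ne (by omega)]
          exact hval j (by omega)

-- A computes Fib(n+2) on naturals ≥ 3
theorem pvA_eq (n : Nat) (hn : 3 ≤ n) :
    count_binary_sequence ((n : Nat) : Int) = (Nat.fib (n + 2) : Int) := by
  have hne1 : ((n : Nat) : Int) ≠ 1 := by omega
  have hne2 : ((n : Nat) : Int) ≠ 2 := by omega
  simp only [count_binary_sequence]
  rw [if_neg hne1, if_neg hne2]
  rw [show (((n : Nat) : Int) + 1).toNat = n + 1 from by omega]
  rw [PySem.List.pySetD_of_nonneg (i := 1) _ _ (by norm_num),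
      PySem.List.pySetD_of_nonneg (i := 2) _ _ (by norm_num)]
  rw [show Int.toNat 1 = 1 from rfl, show Int.toNat 2 = 2 from rfl]
  have h := (pvLoop n hn n (by omega) (le_refl n)).2 n (le_refl n)
  rw [PySem.List.pyGetD_natCast]
  simp only [List.getD, h, Option.getD_some, pvVal]
  rw [if_neg (by omega)]

-- ===== VERDICT (by name: the statement is the Claim_ definition above) =====
theorem count_binary_sequence_spec : Claim_equal_count_binary_sequence := by
  intro n _ hpre
  unfold Spec_count_binary_sequence count_binary_sequence_alt
  have hpre' : (1 : Int) ≤ n := hpre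
  by_cases h1 : n = 1
  · subst h1
    rw [show ((1 : Int) + 2).toNat = 3 from rfl, pvFd_eq]
    decide
  by_cases h2 : n = 2
  · subst h2
    rw [show ((2 : Int) + 2).toNat = 4 from rfl, pvFd_eq]
    decide
  obtain ⟨m, rfl⟩ : ∃ m : Nat, n = ((m : Nat) : Int) := ⟨n.toNat, by omega⟩
  have h3 : 3 ≤ m := by omega
  rw [show (((m : Nat) : Int) + 2).toNat = m + 2 from by omega, pvFd_eq, pvA_eq m h3]
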